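-- pv_equiv track=rewrite | github.com/NERDYNEKO/Daily-Leetcode-Grind | 2535-difference-between-element-sum-and-digit-sum-of-an-array/2535-difference-between-element-sum-and-digit-sum-of-an-array.py | differenceOfSum
-- ===== SOURCE A (Python) =====
-- from typing import List
--
-- def differenceOfSum(nums: List[int]) -> int:
--     total_ele=0
--     digit_sum=0
--     for i in nums:
--         total_ele+=i
--     for n in nums:
--         while n>0:
--             k=n%10
--             n=n//10
--             digit_sum+=k
--     return (total_ele-digit_sum)
-- ===== SOURCE B (Python) =====
-- def differenceOfSum(nums):
--     digit_total = sum(ord(c) - 48 for n in nums if n > 0 for c in str(n))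
--     return sum(nums) - digit_total
-- ===== Notes on version B (the rewrite author's own statement) =====
-- stated objective: idiomatic
-- what changed: Replaces the explicit element-sum loop and the modulo/floor-division digit-extraction while-loop with builtin sum() and a single generator that reads the digits of each positive number from its decimal string representation.
import Mathlib
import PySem

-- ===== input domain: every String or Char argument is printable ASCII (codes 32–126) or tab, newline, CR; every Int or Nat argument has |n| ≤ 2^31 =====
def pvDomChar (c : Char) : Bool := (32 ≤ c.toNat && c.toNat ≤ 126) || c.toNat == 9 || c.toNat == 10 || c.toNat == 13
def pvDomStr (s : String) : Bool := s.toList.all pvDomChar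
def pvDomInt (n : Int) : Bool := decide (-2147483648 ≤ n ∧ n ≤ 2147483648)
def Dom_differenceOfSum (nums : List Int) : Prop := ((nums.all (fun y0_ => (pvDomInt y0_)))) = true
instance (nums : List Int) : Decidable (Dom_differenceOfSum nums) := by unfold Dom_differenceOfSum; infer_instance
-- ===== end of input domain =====

-- B computes the digit sum by reading the digits of each positive number from its
-- decimal string representation (ord(c) - 48), replacing A's modulo/division while-loop.

-- ===== PORT A =====
-- inner 'while n > 0: k = n % 10; n = n // 10; digit_sum += k'
def aDigitLoop (n : Int) (digit_sum : Int) : Int :=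
  if n > 0 then
    aDigitLoop (PySem.Int.floordiv n 10) (digit_sum + PySem.Int.mod n 10)
  else digit_sum
termination_by n.toNat
decreasing_by
  rw [PySem.Int.floordiv_eq_ediv_of_pos (by norm_num : (0:Int) < 10)]
  omega

def differenceOfSum (nums : List Int) : Int :=
  let total_ele := nums.foldl (fun acc i => acc + i) 0
  let digit_sum := nums.foldl (fun acc n => aDigitLoop n acc) 0
  total_ele - digit_sum

-- ===== PORT B =====
def differenceOfSum_alt (nums : List Int) : Int :=
  let digit_total :=
    ((nums.filter (fun n => n > 0)).flatMap
      (fun n => (PySem.Int.toChars n).map (fun c => (c.toNat : Int) - 48))).sum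
  nums.sum - digit_total

-- ===== PRECONDITION & SPEC =====
def Spec_differenceOfSum (nums : List Int) (out : Int) : Prop := out = differenceOfSum_alt nums
instance (nums : List Int) (out : Int) : Decidable (Spec_differenceOfSum nums out) := by unfold Spec_differenceOfSum; infer_instance

-- ===== CLAIM (what is proved, stated in full; the proofs are below) =====
def Claim_equal_differenceOfSum : Prop := ∀ (nums : List Int), Dom_differenceOfSum nums → Spec_differenceOfSum nums (differenceOfSum nums)

-- ===== LEMMAS AND PROOFS =====

-- Nat-level digit sum, the common value of both digit extractions
def dsN (m : Nat) : Nat :=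
  if m = 0 then 0 else m % 10 + dsN (m / 10)
decreasing_by exact Nat.div_lt_self (by omega) (by norm_num)

lemma aDigitLoop_nonpos (n acc : Int) (h : ¬ n > 0) : aDigitLoop n acc = acc := by
  rw [aDigitLoop]; simp [h]

lemma aDigitLoop_natCast (m : Nat) : ∀ acc : Int, aDigitLoop (m : Int) acc = acc + (dsN m : Int) := by
  induction m using Nat.strong_induction_on with
  | _ m ih =>
    intro acc
    rcases Nat.eq_zero_or_pos m with h0 | hpos
    · subst h0
      rw [aDigitLoop_nonpos _ _ (by norm_num), dsN]
      simp
    · rw [aDigitLoop]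
      have hm : ((m : Int) > 0) := by exact_mod_cast hpos
      rw [if_pos hm]
      have hfd : PySem.Int.floordiv (m : Int) 10 = ((m / 10 : Nat) : Int) :=
        PySem.Int.floordiv_natCast m 10
      have hmd : PySem.Int.mod (m : Int) 10 = ((m % 10 : Nat) : Int) :=
        PySem.Int.mod_natCast m 10
      rw [hfd, hmd, ih (m / 10) (Nat.div_lt_self hpos (by norm_num))]
      conv_rhs => rw [dsN, if_neg (by omega : ¬ m = 0)]
      push_cast
      ring

lemma digitChar_val (r : Nat) (h : r < 10) :
    ((Nat.digitChar r).toNat : Int) - 48 = (r : Int) := by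
  interval_cases r <;> decide

def charsum (cs : List Char) : Int := (cs.map (fun c => (c.toNat : Int) - 48)).sum

lemma toDigitsCore_charsum : ∀ (f m : Nat) (l : List Char), m < f →
    charsum (Nat.toDigitsCore 10 f m l) = (dsN m : Int) + charsum l := by
  intro f
  induction f with
  | zero => intro m l h; omega
  | succ f ih =>
    intro m l h
    rw [Nat.toDigitsCore]
    by_cases hz : m / 10 = 0
    · rw [if_pos hz]
      have : charsum (Nat.digitChar (m % 10) :: l)
          = ((m % 10 : Nat) : Int) + charsum l := by
        simp [charsum, digitChar_val (m % 10) (Nat.mod_lt m (by norm_num))]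
      rw [this]
      congr 1
      rcases Nat.eq_zero_or_pos m with h0 | hpos
      · subst h0; rw [dsN]; simp
      · rw [dsN, if_neg (by omega), hz, dsN]; simp
    · rw [if_neg hz]
      have hlt : m / 10 < f := by
        have := Nat.div_lt_self (by omega : 0 < m) (by norm_num : 1 < 10)
        omega
      rw [ih (m / 10) _ hlt]
      have hcs : charsum (Nat.digitChar (m % 10) :: l)
          = ((m % 10 : Nat) : Int) + charsum l := by
        simp [charsum, digitChar_val (m % 10) (Nat.mod_lt m (by omega))]
      rw [hcs]
      conv_rhs => rw [dsN, if_neg (by omega : ¬ m = 0)]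
      push_cast
      ring

lemma toChars_charsum (n : Int) (h : n > 0) :
    charsum (PySem.Int.toChars n) = (dsN n.toNat : Int) := by
  rw [PySem.Int.toChars, if_neg (by omega), Nat.toDigits]
  rw [toDigitsCore_charsum (n.toNat + 1) n.toNat [] (Nat.lt_succ_self _)]
  simp [charsum]

-- per-element contribution
def dsB (n : Int) : Int := if n > 0 then (dsN n.toNat : Int) else 0

lemma aDigitLoop_eq (n acc : Int) : aDigitLoop n acc = acc + dsB n := by
  by_cases h : n > 0
  · have hm : n = ((n.toNat : Nat) : Int) := by omega
    rw [dsB, if_pos h, hm, aDigitLoop_natCast]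
    simp
    congr 1
    omega
  · rw [aDigitLoop_nonpos _ _ h, dsB, if_neg h]; ring

lemma foldl_aDigitLoop (nums : List Int) : ∀ acc : Int,
    nums.foldl (fun acc n => aDigitLoop n acc) acc = acc + (nums.map dsB).sum := by
  induction nums with
  | nil => intro acc; simp
  | cons x xs ih =>
    intro acc
    rw [List.foldl_cons, aDigitLoop_eq, ih, List.map_cons, List.sum_cons]
    ring

lemma flatMap_digit_sum (nums : List Int) :
    ((nums.filter (fun n => n > 0)).flatMap
      (fun n => (PySem.Int.toChars n).map (fun c => (c.toNat : Int) - 48))).sum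
    = (nums.map dsB).sum := by
  induction nums with
  | nil => simp
  | cons x xs ih =>
    simp only [List.filter_cons]
    by_cases h : x > 0
    · rw [if_pos (by simpa using h), List.flatMap_cons, List.sum_append, ih,
        List.map_cons, List.sum_cons]
      have hdx : ((PySem.Int.toChars x).map (fun c => (c.toNat : Int) - 48)).sum = dsB x := by
        have := toChars_charsum x h
        simpa [charsum, dsB, if_pos h] using this
      rw [hdx]
    · rw [if_neg (by simpa using h), ih, List.map_cons, List.sum_cons]
      simp [dsB, h]

lemma foldl_add_eq_sum (nums : List Int) :
    nums.foldl (fun acc i => acc + i) 0 = nums.sum := by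
  rw [List.sum_eq_foldl]

-- ===== VERDICT (by name: the statement is the Claim_ definition above) =====
theorem differenceOfSum_spec : Claim_equal_differenceOfSum := by
  intro nums _
  unfold Spec_differenceOfSum differenceOfSum differenceOfSum_alt
  simp only [foldl_add_eq_sum, foldl_aDigitLoop, flatMap_digit_sum]
  ring
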